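-- pv_equiv track=rewrite | github.com/Jirles/dq-exploring_us_births_1993-2014 | US Births 1994-2014.py | calc_total_sec_arg
-- ===== SOURCE A (Python) =====
-- def calc_total_sec_arg(data, group_by_index, count_index, count_value):
--     '''
--     data: list of lists
--     group_by_index: integer, index by which to group data totals, serve as keys in totals dictionary; name take from
--     GROUP BY SQL command
--     count_index: integer, secondary index by which totals are calculated; name taken from COUNT SQL command
--     count_value: integer, condition to be met to supplement totals; name taken from COUNT SQL command
--
--     function returns a dictionary a totals calculated by the count_value and grouped by the group_by_index.
--     function should be used in lieu of calc_counts when an additional arg is needed to parse data, e.g. calculating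
--         how many births occured in Jan between 1994 and 2003.
--     '''
--     totals = {}
--     for item in data:
--         if item[count_index] == count_value:
--             if item[group_by_index] in totals.keys():
--                 totals[item[group_by_index]] += item[4]
--             else:
--                 totals[item[group_by_index]] = item[4]
--     return totals
-- ===== SOURCE B (Python) =====
-- def calc_total_sec_arg(data, group_by_index, count_index, count_value):
--     pairs = [(item[group_by_index], item[4]) for item in data
--              if item[count_index] == count_value]
--     keys = list(dict.fromkeys(k for k, _ in pairs))
--     return {k: sum(v for kk, v in pairs if kk == k) for k in keys}
-- ===== Notes on version B (the rewrite author's own statement) =====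
-- stated objective: alternative
-- what changed: Replaced the single-scan running-dict accumulation with a filter-and-project pass that materialises the (key, value) pairs, an ordered key dedup (dict.fromkeys), and a per-key summation over the pair list.
import Mathlib
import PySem

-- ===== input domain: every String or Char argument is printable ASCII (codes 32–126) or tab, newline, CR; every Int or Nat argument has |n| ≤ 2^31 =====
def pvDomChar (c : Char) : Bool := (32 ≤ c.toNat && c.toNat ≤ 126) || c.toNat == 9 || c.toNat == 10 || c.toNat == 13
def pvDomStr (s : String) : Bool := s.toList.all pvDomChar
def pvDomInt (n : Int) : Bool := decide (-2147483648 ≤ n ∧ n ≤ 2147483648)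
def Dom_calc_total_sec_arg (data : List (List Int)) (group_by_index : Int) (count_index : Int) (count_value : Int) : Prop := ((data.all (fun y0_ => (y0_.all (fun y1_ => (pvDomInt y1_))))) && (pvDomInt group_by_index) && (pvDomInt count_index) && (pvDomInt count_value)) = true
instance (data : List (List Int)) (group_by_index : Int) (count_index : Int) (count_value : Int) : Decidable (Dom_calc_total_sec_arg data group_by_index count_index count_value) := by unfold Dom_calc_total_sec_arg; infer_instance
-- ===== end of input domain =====

-- B replaces A's running-dict accumulation by filter/project, ordered key dedup, and per-key summation (alternative decomposition, same results).


-- ===== PORT A =====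
-- Literal transliteration: running dict, one pass; item[...] via pyGet? (.getD 0 is only
-- reached outside Pre_, where Python raises IndexError).
def calc_total_sec_arg (data : List (List Int)) (group_by_index : Int) (count_index : Int) (count_value : Int) : List (Int × Int) :=
  (data.foldl (fun (totals : PySem.Dict Int Int) item =>
      if PySem.List.pyGet? item count_index = some count_value then
        let k := (PySem.List.pyGet? item group_by_index).getD 0
        if totals.contains k then
          totals.insert k (totals.getD k 0 + (PySem.List.pyGet? item 4).getD 0)
        else
          totals.insert k ((PySem.List.pyGet? item 4).getD 0)
      else totals)
    PySem.Dict.empty).items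

-- ===== PORT B =====
-- Transliteration of Source B: pairs comprehension, dict.fromkeys dedup (PySem.List.dedup), per-key sums.
def calc_total_sec_arg_alt (data : List (List Int)) (group_by_index : Int) (count_index : Int) (count_value : Int) : List (Int × Int) :=
  let pairs := (data.filter (fun item => PySem.List.pyGet? item count_index == some count_value)).map
      (fun item => ((PySem.List.pyGet? item group_by_index).getD 0, (PySem.List.pyGet? item 4).getD 0))
  let keys := PySem.List.dedup (pairs.map Prod.fst)
  keys.map (fun k => (k, ((pairs.filter (fun p => p.1 == k)).map Prod.snd).sum))

-- ===== PRECONDITION & SPEC =====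
-- Pre_ excludes exactly the inputs where Python A raises IndexError: some row's lookup at
-- count_index fails, or a row passing the count filter fails the lookup at group_by_index or 4.
def Pre_calc_total_sec_arg (data : List (List Int)) (group_by_index : Int) (count_index : Int) (count_value : Int) : Prop :=
  ∀ item ∈ data, (PySem.List.pyGet? item count_index).isSome ∧
    (PySem.List.pyGet? item count_index = some count_value →
      (PySem.List.pyGet? item group_by_index).isSome ∧ (PySem.List.pyGet? item 4).isSome)
instance (data : List (List Int)) (group_by_index : Int) (count_index : Int) (count_value : Int) : Decidable (Pre_calc_total_sec_arg data group_by_index count_index count_value) := by unfold Pre_calc_total_sec_arg; infer_instance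
def pvWitness_calc_total_sec_arg : List (List Int) × Int × Int × Int :=
  ([[1994, 1, 1, 6, 8096], [1994, 1, 2, 7, 7772], [1994, 2, 1, 1, 9500]], 1, 3, 7)

def Spec_calc_total_sec_arg (data : List (List Int)) (group_by_index : Int) (count_index : Int) (count_value : Int) (out : List (Int × Int)) : Prop := out = calc_total_sec_arg_alt data group_by_index count_index count_value
instance (data : List (List Int)) (group_by_index : Int) (count_index : Int) (count_value : Int) (out : List (Int × Int)) : Decidable (Spec_calc_total_sec_arg data group_by_index count_index count_value out) := by unfold Spec_calc_total_sec_arg; infer_instance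

-- ===== CLAIM (what is proved, stated in full; the proofs are below) =====
def Claim_equal_calc_total_sec_arg : Prop := ∀ (data : List (List Int)) (group_by_index : Int) (count_index : Int) (count_value : Int), Dom_calc_total_sec_arg data group_by_index count_index count_value → Pre_calc_total_sec_arg data group_by_index count_index count_value → Spec_calc_total_sec_arg data group_by_index count_index count_value (calc_total_sec_arg data group_by_index count_index count_value)

-- ===== LEMMAS AND PROOFS =====

-- A's fold over data equals a fold over the filtered/projected pair list (B's `pairs`).
theorem foldl_data_eq_foldl_pairs (data : List (List Int)) (gi ci cv : Int)
    (step : PySem.Dict Int Int → Int × Int → PySem.Dict Int Int) (d : PySem.Dict Int Int) :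
    data.foldl (fun totals item =>
        if PySem.List.pyGet? item ci = some cv then
          step totals ((PySem.List.pyGet? item gi).getD 0, (PySem.List.pyGet? item 4).getD 0)
        else totals) d
    = ((data.filter (fun item => PySem.List.pyGet? item ci == some cv)).map
        (fun item => ((PySem.List.pyGet? item gi).getD 0, (PySem.List.pyGet? item 4).getD 0))).foldl step d := by
  induction data generalizing d with
  | nil => rfl
  | cons x xs ih =>
      simp only [List.foldl_cons, List.filter_cons]
      by_cases h : PySem.List.pyGet? x ci = some cv
      · simp [h, ih]
      · simp [h, ih]

-- A's two-branch step equals the unconditional insert-with-accumulate step.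
theorem step_merge (d : PySem.Dict Int Int) (k v : Int) :
    (if d.contains k then d.insert k (d.getD k 0 + v) else d.insert k v)
    = d.insert k (d.getD k 0 + v) := by
  by_cases h : d.contains k
  · simp [h]
  · have h' : d.contains k = false := by simpa using h
    simp [h, PySem.Dict.getD_of_not_contains]

-- Value invariant of the accumulate fold.
theorem getD_foldl_acc (ps : List (Int × Int)) (d : PySem.Dict Int Int) (k : Int) :
    (ps.foldl (fun d p => d.insert p.1 (d.getD p.1 0 + p.2)) d).getD k 0
    = d.getD k 0 + ((ps.filter (fun p => p.1 == k)).map Prod.snd).sum := by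
  induction ps generalizing d with
  | nil => simp
  | cons p ps ih =>
      simp only [List.foldl_cons, List.filter_cons, ih, PySem.Dict.getD_insert]
      by_cases h : p.1 = k
      · simp [h]; ring
      · have hb : (p.1 == k) = false := by simpa using h
        simp [hb, Ne.symm h]

-- Key invariant of the accumulate fold from the empty dict.
theorem keys_foldl_acc (ps : List (Int × Int)) :
    (ps.foldl (fun d p => d.insert p.1 (d.getD p.1 0 + p.2)) PySem.Dict.empty).keys
    = PySem.List.dedup (ps.map Prod.fst) := by
  have h := PySem.Dict.keys_foldl_insert_key ps (fun p : Int × Int => p.1)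
      (fun d p => d.getD p.1 0 + p.2) PySem.Dict.empty
  simpa [PySem.Dict.keys_empty] using h

theorem nodup_keys_foldl_acc (ps : List (Int × Int)) :
    (ps.foldl (fun d p => d.insert p.1 (d.getD p.1 0 + p.2)) PySem.Dict.empty).keys.Nodup := by
  rw [keys_foldl_acc]; exact PySem.List.nodup_dedup _

-- ===== VERDICT (by name: the statement is the Claim_ definition above) =====
theorem calc_total_sec_arg_spec : Claim_equal_calc_total_sec_arg := by
  intro data gi ci cv _ _
  unfold Spec_calc_total_sec_arg calc_total_sec_arg calc_total_sec_arg_alt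
  -- merge A's two branches into the single accumulate step
  have hmerge : (fun (totals : PySem.Dict Int Int) item =>
      if PySem.List.pyGet? item ci = some cv then
        let k := (PySem.List.pyGet? item gi).getD 0
        if totals.contains k then
          totals.insert k (totals.getD k 0 + (PySem.List.pyGet? item 4).getD 0)
        else totals.insert k ((PySem.List.pyGet? item 4).getD 0)
      else totals)
      = (fun (totals : PySem.Dict Int Int) item =>
      if PySem.List.pyGet? item ci = some cv then
        (fun d (p : Int × Int) => d.insert p.1 (d.getD p.1 0 + p.2)) totals
          ((PySem.List.pyGet? item gi).getD 0, (PySem.List.pyGet? item 4).getD 0)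
      else totals) := by
    funext totals item
    by_cases h : PySem.List.pyGet? item ci = some cv
    · simp only [h]
      exact step_merge totals _ _
    · simp [h]
  rw [hmerge, foldl_data_eq_foldl_pairs data gi ci cv (fun d p => d.insert p.1 (d.getD p.1 0 + p.2)) PySem.Dict.empty]
  dsimp only
  set ps := (data.filter (fun item => PySem.List.pyGet? item ci == some cv)).map
      (fun item => ((PySem.List.pyGet? item gi).getD 0, (PySem.List.pyGet? item 4).getD 0)) with hps
  rw [PySem.Dict.items_eq_map_keys _ (nodup_keys_foldl_acc ps) 0, keys_foldl_acc ps]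
  refine List.map_congr_left ?_
  intro k _
  rw [getD_foldl_acc ps PySem.Dict.empty k]
  simp [PySem.Dict.getD_empty]
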